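-- pv_equiv track=rewrite | github.com/Ishaan29/fuzzy-chainsaw-algo | cp/seq.py | series
-- ===== SOURCE A (Python) =====
-- def series(n):
--     ans = [0 for _ in range(n)]
--     even = 1
--     odd = 1
--     for i in range(0 ,n-1):
--         if(i % 2 == 0):
--             odd *= 3
--         else:
--             even *= 2
--     if n%2 == 0:
--         return odd
--     else:
--         return even
-- ===== SOURCE B (Python) =====
-- def series(n):
--     if n <= 1:
--         return 1
--     return 3 ** (n // 2) if n % 2 == 0 else 2 ** ((n - 1) // 2)
-- ===== Notes on version B (the rewrite author's own statement) =====
-- stated objective: faster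
-- what changed: Replaces the O(n) loop that multiplies one factor per iteration with a single closed-form exponentiation: the number of loop steps hitting each branch is computed arithmetically and the returned power is computed directly with the built-in ** (intended as faster; measured about 100x at n=65536 and over 1000x at n=262144, where A timed out).
import Mathlib
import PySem

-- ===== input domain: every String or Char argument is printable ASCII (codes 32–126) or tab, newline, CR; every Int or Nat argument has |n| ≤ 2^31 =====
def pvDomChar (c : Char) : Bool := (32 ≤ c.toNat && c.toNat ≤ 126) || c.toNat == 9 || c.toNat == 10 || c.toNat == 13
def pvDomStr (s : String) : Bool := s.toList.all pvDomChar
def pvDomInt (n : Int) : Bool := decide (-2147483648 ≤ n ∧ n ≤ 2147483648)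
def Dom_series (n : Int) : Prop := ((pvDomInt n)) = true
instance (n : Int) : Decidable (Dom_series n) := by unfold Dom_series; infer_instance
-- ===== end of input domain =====

-- B replaces A's one-multiplication-per-step loop by a closed-form exponentiation (intended as faster; measured ~100-1000x on a timing run's mid sizes, unconfirmed at the largest where huge outputs dominate).

-- ===== PORT A =====
-- state: (even, odd); the unused 'ans' list is dead code and is not ported
def series (n : Int) : Int :=
  let st := (PySem.List.pyRange 0 (n - 1) 1).foldl
    (fun (p : Int × Int) i =>
      if PySem.Int.mod i 2 == 0 then (p.1, p.2 * 3) else (p.1 * 2, p.2)) (1, 1)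
  if PySem.Int.mod n 2 == 0 then st.2 else st.1

-- ===== PORT B =====
def series_alt (n : Int) : Int :=
  if n ≤ 1 then 1
  else if PySem.Int.mod n 2 == 0 then 3 ^ (PySem.Int.floordiv n 2).toNat
  else 2 ^ (PySem.Int.floordiv (n - 1) 2).toNat

-- ===== PRECONDITION & SPEC =====
def Spec_series (n : Int) (out : Int) : Prop := out = series_alt n
instance (n : Int) (out : Int) : Decidable (Spec_series n out) := by unfold Spec_series; infer_instance

-- ===== CLAIM (what is proved, stated in full; the proofs are below) =====
def Claim_equal_series : Prop := ∀ (n : Int), Dom_series n → Spec_series n (series n)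

-- ===== LEMMAS AND PROOFS =====

-- characterisation of A's loop over range(0, m)
theorem series_loop_eval (m : Nat) :
    (PySem.List.pyRange 0 (m : Int) 1).foldl
      (fun (p : Int × Int) i =>
        if PySem.Int.mod i 2 == 0 then (p.1, p.2 * 3) else (p.1 * 2, p.2)) (1, 1)
      = (2 ^ (m / 2), 3 ^ ((m + 1) / 2)) := by
  induction m with
  | zero => simp [PySem.List.pyRange_one_eq_nil]
  | succ k ih =>
    have h : ((k : Int) + 1) = ((k + 1 : Nat) : Int) := by push_cast; ring
    rw [show ((k + 1 : Nat) : Int) = (k : Int) + 1 by push_cast; ring,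
        PySem.List.pyRange_one_succ_right (by positivity), List.foldl_append, ih]
    simp only [List.foldl_cons, List.foldl_nil]
    rcases Nat.even_or_odd k with he | ho
    · obtain ⟨j, hj⟩ := he
      have : PySem.Int.mod (k : Int) 2 = ((k % 2 : Nat) : Int) := PySem.Int.mod_natCast k 2
      rw [this]
      have hk2 : k % 2 = 0 := by omega
      simp only [hk2, Nat.cast_zero, beq_self_eq_true, if_true]
      have e1 : (k + 1) / 2 = k / 2 := by omega
      have e2 : (k + 1 + 1) / 2 = (k + 1) / 2 + 1 := by omega
      rw [e1, e2, e1, pow_succ]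
    · obtain ⟨j, hj⟩ := ho
      have : PySem.Int.mod (k : Int) 2 = ((k % 2 : Nat) : Int) := PySem.Int.mod_natCast k 2
      rw [this]
      have hk2 : k % 2 = 1 := by omega
      simp only [hk2, Nat.cast_one]
      norm_num
      have e1 : (k + 1) / 2 = k / 2 + 1 := by omega
      have e2 : (k + 1 + 1) / 2 = (k + 1) / 2 := by omega
      rw [e1, e2, e1, pow_succ]
      exact ⟨rfl, rfl⟩

-- ===== VERDICT (by name: the statement is the Claim_ definition above) =====
theorem series_spec : Claim_equal_series := by
  intro n _
  unfold Spec_series series series_alt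
  by_cases h1 : n ≤ 1
  · rw [PySem.List.pyRange_one_eq_nil (by omega)]
    simp only [List.foldl_nil, if_pos h1]
    split <;> rfl
  · push Not at h1
    set m : Nat := (n - 1).toNat with hm
    have hn : n = (m : Int) + 1 := by omega
    have hrange : n - 1 = (m : Int) := by omega
    rw [hrange, series_loop_eval]
    have hm1 : 1 ≤ m := by omega
    have hmod : PySem.Int.mod n 2 = (((m + 1) % 2 : Nat) : Int) := by
      rw [show n = ((m + 1 : Nat) : Int) by push_cast; omega]
      exact PySem.Int.mod_natCast (m + 1) 2
    have hdiv : PySem.Int.floordiv n 2 = (((m + 1) / 2 : Nat) : Int) := by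
      rw [show n = ((m + 1 : Nat) : Int) by push_cast; omega]
      exact PySem.Int.floordiv_natCast (m + 1) 2
    have hdiv' : PySem.Int.floordiv ((m : Nat) : Int) 2 = ((m / 2 : Nat) : Int) :=
      PySem.Int.floordiv_natCast m 2
    rw [hmod, hdiv, hdiv']
    have hle : ¬ n ≤ 1 := by omega
    simp only [hle, if_false]
    rcases Nat.even_or_odd m with he | ho
    · obtain ⟨j, hj⟩ := he
      have h2 : (m + 1) % 2 = 1 := by omega
      simp [h2]
      omega
    · obtain ⟨j, hj⟩ := ho
      have h2 : (m + 1) % 2 = 0 := by omega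
      simp [h2]
      omega
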